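-- pv_equiv track=rewrite | github.com/mgiannopoulos24/Leetcode | Python/1799.py | maxScore
-- ===== SOURCE A (Python) =====
-- from typing import List
-- from math import gcd
--
-- def maxScore(nums: List[int]) -> int:
--     n = len(nums) // 2
--
--     # Memoization dictionary to store computed states
--     memo = {}
--
--     def dp(mask: int, operation: int) -> int:
--         # Base case: if all pairs are made
--         if mask == (1 << len(nums)) - 1:
--             return 0
--
--         # If this state has already been computed
--         if (mask, operation) in memo:
--             return memo[(mask, operation)]
--
--         max_score = 0
--
--         # Try all pairs of elements (i, j)
--         for i in range(len(nums)):
--             if mask & (1 << i):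
--                 continue  # i-th element is already used
--
--             for j in range(i + 1, len(nums)):
--                 if mask & (1 << j):
--                     continue  # j-th element is already used
--
--                 # Calculate new mask after picking elements i and j
--                 new_mask = mask | (1 << i) | (1 << j)
--                 # Score of this operation
--                 current_score = operation * gcd(nums[i], nums[j])
--                 # Recursively calculate the maximum score
--                 max_score = max(max_score, current_score + dp(new_mask, operation + 1))
--
--         # Store the result in memoization table
--         memo[(mask, operation)] = max_score
--         return max_score
--
--     # Start recursion with an empty mask and operation 1
--     return dp(0, 1)
-- ===== SOURCE B (Python) =====
-- from typing import List
-- from math import gcd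
--
-- def maxScore(nums: List[int]) -> int:
--     n = len(nums)
--     full = (1 << n) - 1
--     # precomputed gcd table
--     g = [[gcd(nums[i], nums[j]) for j in range(n)] for i in range(n)]
--     # bottom-up tabulation: dp[mask] = best score obtainable from state mask
--     dp = [0] * (full + 1)
--     for mask in reversed(range(full)):
--         used = bin(mask).count("1")
--         if used & 1:
--             continue  # states with an odd number of used elements are unreachable
--         op = used // 2 + 1
--         best = 0
--         for i in range(n):
--             if mask >> i & 1:
--                 continue
--             for j in range(i + 1, n):
--                 if mask >> j & 1:
--                     continue
--                 s = op * g[i][j] + dp[mask | 1 << i | 1 << j]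
--                 if s > best:
--                     best = s
--         dp[mask] = best
--     return dp[0]
-- ===== Notes on version B (the rewrite author's own statement) =====
-- stated objective: alternative
-- what changed: Replaces A's memoized top-down recursion (dict keyed by (mask, operation), recursion, gcd recomputed per call) with an iterative bottom-up table over masks in decreasing order using a flat list, a precomputed gcd table, and a skip of the unreachable odd-popcount states; intended as a constant-factor speedup (measured ~2.3x at n=16, but the problem is exponential in n so a timing run could not confirm 'faster').
import Mathlib
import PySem

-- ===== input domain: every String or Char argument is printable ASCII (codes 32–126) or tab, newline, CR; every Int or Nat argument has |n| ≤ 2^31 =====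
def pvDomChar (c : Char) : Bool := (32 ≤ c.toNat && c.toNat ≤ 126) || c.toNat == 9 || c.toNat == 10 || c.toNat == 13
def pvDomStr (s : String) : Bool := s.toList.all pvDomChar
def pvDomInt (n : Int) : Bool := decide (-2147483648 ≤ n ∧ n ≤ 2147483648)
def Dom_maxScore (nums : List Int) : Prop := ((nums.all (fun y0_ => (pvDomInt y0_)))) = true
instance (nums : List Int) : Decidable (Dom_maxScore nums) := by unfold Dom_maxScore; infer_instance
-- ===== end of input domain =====

-- B replaces A's memoized top-down recursion (dict keyed by (mask, operation)) with a
-- bottom-up table over masks in decreasing order, a precomputed gcd table and a flat list,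
-- skipping the unreachable odd-popcount states; same value by a different structure.

-- ===== PORT A =====

-- math.gcd: nonnegative gcd of the absolute values (exact for Int arguments)
def pvGcd (a b : Int) : Int := (Int.gcd a b : Int)

-- dp(mask, operation) of A, with the memo dict threaded through the recursion
-- ((mask, operation) in memo / memo[(mask, operation)] ported as one get? match;
-- memo[(mask, operation)] = max_score is Dict.insert).  The fuel is a termination
-- artifact only: mask strictly grows below 2^len-1 on every recursive call, so fuel
-- 2^len is never exhausted from maxScore's initial call.
def dpMemo (nums : List Int) :
    Nat → Nat → Int → PySem.Dict (Nat × Int) Int → Int × PySem.Dict (Nat × Int) Int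
  | 0, _, _, memo => (0, memo)
  | fuel+1, mask, operation, memo =>
    if mask = 2 ^ nums.length - 1 then (0, memo)
    else
      -- '(mask, operation) in memo' / 'return memo[(mask, operation)]' (guarded lookup)
      if memo.contains (mask, operation) then (memo.getD (mask, operation) 0, memo)
      else
        let r := (List.range nums.length).foldl
          (fun (p : Int × PySem.Dict (Nat × Int) Int) i =>
            if mask &&& (1 <<< i) ≠ 0 then p
            else
              -- range(i+1, len(nums)) over natural numbers (exact: bounds are nonnegative)
              (List.range' (i+1) (nums.length - (i+1))).foldl (fun p2 j =>
                if mask &&& (1 <<< j) ≠ 0 then p2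
                else
                  let q := dpMemo nums fuel (mask ||| (1 <<< i) ||| (1 <<< j))
                    (operation + 1) p2.2
                  (max p2.1 (operation * pvGcd (nums.getD i 0) (nums.getD j 0) + q.1),
                    q.2)) p) (0, memo)
        (r.1, r.2.insert (mask, operation) r.1)

def maxScore (nums : List Int) : Int := (dpMemo nums (2 ^ nums.length) 0 1 PySem.Dict.empty).1

-- ===== PORT B =====

-- bin(mask).count("1"): number of 1 bits of a nonnegative integer (exact)
def pvBitCount : Nat → Nat
  | 0 => 0
  | m+1 => ((m+1) % 2) + pvBitCount ((m+1) / 2)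
decreasing_by omega

-- the precomputed gcd table g of Source B
def bGcdTable (nums : List Int) : List (List Int) :=
  (List.range nums.length).map (fun i =>
    (List.range nums.length).map (fun j => pvGcd (nums.getD i 0) (nums.getD j 0)))

-- body of Source B's `for mask in reversed(range(full))` loop (factored out for the proofs;
-- it is exactly the loop body)
def bStep (nums : List Int) (g : List (List Int)) (dp : List Int) (mask : Nat) : List Int :=
  let used := pvBitCount mask
  if used &&& 1 ≠ 0 then dp          -- continue: unreachable states stay 0
  else
    let op : Int := ((used / 2 : Nat) : Int) + 1
    let best := (List.range nums.length).foldl (fun best i =>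
      if mask >>> i &&& 1 ≠ 0 then best
      else (List.range' (i+1) (nums.length - (i+1))).foldl (fun best2 j =>
        if mask >>> j &&& 1 ≠ 0 then best2
        else
          let s := op * ((g.getD i []).getD j 0) +
            dp.getD (mask ||| (1 <<< i) ||| (1 <<< j)) 0
          if s > best2 then s else best2) best) 0
    dp.set mask best

def maxScore_alt (nums : List Int) : Int :=
  let full := 2 ^ nums.length - 1
  let dpF := (List.range full).reverse.foldl (bStep nums (bGcdTable nums))
    (List.replicate (full + 1) 0)
  dpF.getD 0 0

-- ===== PRECONDITION & SPEC =====
def Spec_maxScore (nums : List Int) (out : Int) : Prop := out = maxScore_alt nums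
instance (nums : List Int) (out : Int) : Decidable (Spec_maxScore nums out) := by unfold Spec_maxScore; infer_instance

-- ===== CLAIM (what is proved, stated in full; the proofs are below) =====
def Claim_equal_maxScore : Prop := ∀ (nums : List Int), Dom_maxScore nums → Spec_maxScore nums (maxScore nums)

-- ===== LEMMAS AND PROOFS =====

-- reference recursion: A's dp without the memo dict (used only by the proofs)
def dpA (nums : List Int) : Nat → Nat → Int → Int
  | 0, _, _ => 0
  | fuel+1, mask, operation =>
    if mask = 2 ^ nums.length - 1 then 0
    else
      (List.range nums.length).foldl (fun acc i =>
        if mask &&& (1 <<< i) ≠ 0 then acc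
        else
          (List.range' (i+1) (nums.length - (i+1))).foldl (fun acc2 j =>
            if mask &&& (1 <<< j) ≠ 0 then acc2
            else max acc2 (operation * pvGcd (nums.getD i 0) (nums.getD j 0) +
              dpA nums fuel (mask ||| (1 <<< i) ||| (1 <<< j)) (operation + 1)) ) acc) 0

lemma bitA (m i : Nat) : (m &&& (1 <<< i) ≠ 0) ↔ m.testBit i := by
  rw [Nat.one_shiftLeft, Nat.and_two_pow]
  cases h : m.testBit i <;> simp [h]

lemma bitB (m i : Nat) : (m >>> i &&& 1 ≠ 0) ↔ m.testBit i := by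
  have h1 : m.testBit i = ((m >>> i) &&& 1 = 1) := by
    simp [Nat.testBit, Nat.and_one_is_mod]
  have h2 := Nat.mod_lt (m >>> i) (y := 2) (by norm_num)
  rw [Nat.and_one_is_mod] at *
  rw [h1]
  omega

lemma max_if (b s : Int) : (if s > b then s else b) = max b s := by
  rw [max_def]; split_ifs <;> omega

lemma pc_unfold (m : Nat) : pvBitCount m = m % 2 + pvBitCount (m / 2) := by
  cases m with
  | zero => simp [pvBitCount]
  | succ k => rw [pvBitCount]

lemma mod_two_of_testBit (m : Nat) : m % 2 = if m.testBit 0 then 1 else 0 := by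
  rw [Nat.testBit_zero]
  have h2 : m % 2 < 2 := Nat.mod_lt m (by norm_num)
  by_cases hc : m % 2 = 1 <;> simp [hc] <;> omega

lemma pc_or_pow (i : Nat) : ∀ m, ¬ m.testBit i → pvBitCount (m ||| 2 ^ i) = pvBitCount m + 1 := by
  induction i with
  | zero =>
    intro m h
    have hmod : m % 2 = 0 := by
      rw [mod_two_of_testBit]; simp [h]
    have hor0 : (m ||| 2 ^ 0).testBit 0 = true := by
      simp [Nat.testBit_or]
    have hmod1 : (m ||| 2 ^ 0) % 2 = 1 := by
      rw [mod_two_of_testBit, hor0]; rfl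
    have hdiv : (m ||| 2 ^ 0) / 2 = m / 2 := by
      apply Nat.eq_of_testBit_eq
      intro j
      rw [Nat.testBit_div_two, Nat.testBit_div_two, Nat.testBit_or]
      have h1even : Nat.testBit 1 (j + 1) = false := by
        rw [show (1 : Nat) = 2 ^ 0 by norm_num, Nat.testBit_two_pow]; simp
      simp [h1even]
    rw [pc_unfold (m ||| 2 ^ 0), pc_unfold m, hmod, hmod1, hdiv]
    omega
  | succ i ih =>
    intro m h
    have hmod : (m ||| 2 ^ (i + 1)) % 2 = m % 2 := by
      rw [mod_two_of_testBit, mod_two_of_testBit m, Nat.testBit_or]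
      have : (2 ^ (i + 1)).testBit 0 = false := by
        simp [Nat.testBit_two_pow]
      rw [this, Bool.or_false]
    have hdiv : (m ||| 2 ^ (i + 1)) / 2 = m / 2 ||| 2 ^ i := by
      apply Nat.eq_of_testBit_eq
      intro j
      rw [Nat.testBit_div_two, Nat.testBit_or, Nat.testBit_or, Nat.testBit_div_two]
      have h1 : (2 ^ (i + 1)).testBit (j + 1) = decide (i = j) := by
        simp [Nat.testBit_two_pow]
      have h2 : (2 ^ i).testBit j = decide (i = j) := by
        simp [Nat.testBit_two_pow]
      rw [h1, h2]
    have hih : ¬ (m / 2).testBit i := by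
      rw [Nat.testBit_div_two]; exact h
    rw [pc_unfold (m ||| 2 ^ (i + 1)), pc_unfold m, hmod, hdiv, ih _ hih]
    omega

lemma lt_or_two_pow (m i : Nat) (h : ¬ m.testBit i) : m < m ||| 2 ^ i := by
  refine Nat.lt_of_le_of_ne Nat.left_le_or (fun e => ?_)
  have h2 : (m ||| 2 ^ i).testBit i = true := by
    simp [Nat.testBit_or]
  rw [← e] at h2
  exact h h2

lemma dpA_stable (nums : List Int) : ∀ f g mask op, mask ≤ 2 ^ nums.length - 1 →
    2 ^ nums.length - 1 - mask ≤ f → 2 ^ nums.length - 1 - mask ≤ g →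
    dpA nums (f+1) mask op = dpA nums (g+1) mask op := by
  intro f
  induction f with
  | zero =>
    intro g mask op hle hf hg
    by_cases hfull : mask = 2 ^ nums.length - 1
    · simp only [dpA, if_pos hfull]
    · omega
  | succ f ih =>
    intro g mask op hle hf hg
    by_cases hfull : mask = 2 ^ nums.length - 1
    · simp only [dpA, if_pos hfull]
    · cases g with
      | zero => omega
      | succ g =>
        simp only [dpA]
        rw [if_neg hfull, if_neg hfull]
        apply PySem.List.foldl_congr_mem
        intro acc i hi
        by_cases hbi : mask &&& (1 <<< i) ≠ 0
        · rw [if_pos hbi, if_pos hbi]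
        · rw [if_neg hbi, if_neg hbi]
          apply PySem.List.foldl_congr_mem
          intro acc2 j hj
          by_cases hbj : mask &&& (1 <<< j) ≠ 0
          · rw [if_pos hbj, if_pos hbj]
          · rw [if_neg hbj, if_neg hbj]
            have hi' : i < nums.length := List.mem_range.mp hi
            have hj' : i + 1 ≤ j ∧ j < i + 1 + (nums.length - (i+1)) := List.mem_range'_1.mp hj
            have hjn : j < nums.length := by omega
            have hti : ¬ mask.testBit i := by rw [← bitA]; exact hbi
            have htj : ¬ mask.testBit j := by rw [← bitA]; exact hbj
            have hpow : (1 : Nat) <<< i = 2 ^ i := Nat.one_shiftLeft i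
            have hpowj : (1 : Nat) <<< j = 2 ^ j := Nat.one_shiftLeft j
            have hp1 : (0 : Nat) < 2 ^ nums.length := Nat.two_pow_pos _
            have hlt1 : mask < mask ||| (1 <<< i) := by rw [hpow]; exact lt_or_two_pow mask i hti
            have hlt2 : mask ||| (1 <<< i) ≤ mask ||| (1 <<< i) ||| (1 <<< j) := Nat.left_le_or
            have hnewlt : mask ||| (1 <<< i) ||| (1 <<< j) < 2 ^ nums.length := by
              rw [hpow, hpowj]
              exact Nat.or_lt_two_pow (Nat.or_lt_two_pow (by omega)
                (Nat.pow_lt_pow_right (by norm_num) hi')) (Nat.pow_lt_pow_right (by norm_num) hjn)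
            congr 1
            congr 1
            exact ih g (mask ||| (1 <<< i) ||| (1 <<< j)) (op + 1) (by omega) (by omega) (by omega)

-- every memo entry is a correct dp value (proof-internal invariant of A's memo dict)
def MemoInv (nums : List Int) (memo : PySem.Dict (Nat × Int) Int) : Prop :=
  ∀ mask op v, memo.get? (mask, op) = some v →
    mask ≤ 2 ^ nums.length - 1 ∧ v = dpA nums (2 ^ nums.length) mask op

-- the body of dpMemo's outer loop, named (definitionally equal to the inline lambda)
def mStep (nums : List Int) (f mask : Nat) (op : Int) :
    Int × PySem.Dict (Nat × Int) Int → Nat → Int × PySem.Dict (Nat × Int) Int :=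
  fun p i =>
    if mask &&& (1 <<< i) ≠ 0 then p
    else
      (List.range' (i+1) (nums.length - (i+1))).foldl (fun p2 j =>
        if mask &&& (1 <<< j) ≠ 0 then p2
        else
          (max p2.1 (op * pvGcd (nums.getD i 0) (nums.getD j 0) +
            (dpMemo nums f (mask ||| (1 <<< i) ||| (1 <<< j)) (op + 1) p2.2).1),
           (dpMemo nums f (mask ||| (1 <<< i) ||| (1 <<< j)) (op + 1) p2.2).2)) p

-- the body of dpA's outer loop, named
def aStep (nums : List Int) (f mask : Nat) (op : Int) : Int → Nat → Int :=
  fun acc i =>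
    if mask &&& (1 <<< i) ≠ 0 then acc
    else
      (List.range' (i+1) (nums.length - (i+1))).foldl (fun acc2 j =>
        if mask &&& (1 <<< j) ≠ 0 then acc2
        else max acc2 (op * pvGcd (nums.getD i 0) (nums.getD j 0) +
          dpA nums f (mask ||| (1 <<< i) ||| (1 <<< j)) (op + 1))) acc

lemma dpMemo_succ (nums : List Int) (f mask : Nat) (op : Int)
    (memo : PySem.Dict (Nat × Int) Int) :
    dpMemo nums (f+1) mask op memo =
      if mask = 2 ^ nums.length - 1 then (0, memo)
      else if memo.contains (mask, op) then (memo.getD (mask, op) 0, memo)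
      else
        ((List.foldl (mStep nums f mask op) (0, memo) (List.range nums.length)).1,
         (List.foldl (mStep nums f mask op) (0, memo) (List.range nums.length)).2.insert
           (mask, op)
           (List.foldl (mStep nums f mask op) (0, memo) (List.range nums.length)).1) := rfl

lemma dpA_succ (nums : List Int) (f mask : Nat) (op : Int) :
    dpA nums (f+1) mask op =
      if mask = 2 ^ nums.length - 1 then 0
      else List.foldl (aStep nums f mask op) 0 (List.range nums.length) := rfl

lemma foldl_pair_inv {α : Type} (P : PySem.Dict (Nat × Int) Int → Prop)
    (fM : Int × PySem.Dict (Nat × Int) Int → α → Int × PySem.Dict (Nat × Int) Int)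
    (fA : Int → α → Int) :
    ∀ (l : List α) (p : Int × PySem.Dict (Nat × Int) Int),
      (∀ (q : Int × PySem.Dict (Nat × Int) Int) (x : α), x ∈ l → P q.2 →
        (fM q x).1 = fA q.1 x ∧ P (fM q x).2) →
      P p.2 →
      (List.foldl fM p l).1 = List.foldl fA p.1 l ∧ P (List.foldl fM p l).2 := by
  intro l
  induction l with
  | nil => exact fun p _ hp => ⟨rfl, hp⟩
  | cons x xs ih =>
    intro p h hp
    have hx := h p x (by simp) hp
    rw [List.foldl_cons, List.foldl_cons, ← hx.1]
    exact ih (fM p x) (fun q y hy hq => h q y (List.mem_cons_of_mem _ hy) hq) hx.2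

lemma dpMemo_correct (nums : List Int) : ∀ f mask op memo,
    mask ≤ 2 ^ nums.length - 1 → 2 ^ nums.length - 1 - mask ≤ f → MemoInv nums memo →
    (dpMemo nums (f+1) mask op memo).1 = dpA nums (f+1) mask op ∧
      MemoInv nums (dpMemo nums (f+1) mask op memo).2 := by
  have hp1 : (0 : Nat) < 2 ^ nums.length := Nat.two_pow_pos _
  intro f
  induction f with
  | zero =>
    intro mask op memo hle hf hInv
    have hfull : mask = 2 ^ nums.length - 1 := by omega
    rw [dpMemo_succ, dpA_succ, if_pos hfull, if_pos hfull]
    exact ⟨rfl, hInv⟩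
  | succ f ih =>
    intro mask op memo hle hf hInv
    by_cases hfull : mask = 2 ^ nums.length - 1
    · rw [dpMemo_succ, dpA_succ, if_pos hfull, if_pos hfull]
      exact ⟨rfl, hInv⟩
    · rw [dpMemo_succ, dpA_succ, if_neg hfull, if_neg hfull]
      by_cases hc : memo.contains (mask, op) = true
      · -- memo hit
        rw [if_pos hc]
        obtain ⟨v, hv⟩ : ∃ v, memo.get? (mask, op) = some v := by
          have hiso := PySem.Dict.contains_eq_isSome_get? memo (mask, op)
          rw [hc] at hiso
          exact Option.isSome_iff_exists.mp hiso.symm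
        have hInv' := hInv mask op v hv
        refine ⟨?_, hInv⟩
        show memo.getD (mask, op) 0 = _
        rw [PySem.Dict.getD_of_get?_eq_some memo 0 hv, hInv'.2,
          show (2 : Nat) ^ nums.length = (2 ^ nums.length - 1) + 1 from by omega,
          dpA_stable nums (2 ^ nums.length - 1) (f+1) mask op hle (by omega) hf,
          dpA_succ, if_neg hfull]
      · -- memo miss: the double loop runs, then the result is inserted
        rw [if_neg hc]
        have hpoint : ∀ (q : Int × PySem.Dict (Nat × Int) Int) (i : Nat),
            i ∈ List.range nums.length → MemoInv nums q.2 →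
            (mStep nums (f+1) mask op q i).1 = aStep nums (f+1) mask op q.1 i ∧
              MemoInv nums (mStep nums (f+1) mask op q i).2 := by
          intro q i hi hq
          have hi' : i < nums.length := List.mem_range.mp hi
          simp only [mStep, aStep]
          by_cases hbi : mask &&& (1 <<< i) ≠ 0
          · rw [if_pos hbi, if_pos hbi]
            exact ⟨rfl, hq⟩
          · rw [if_neg hbi, if_neg hbi]
            refine foldl_pair_inv (MemoInv nums) _ _ _ q ?_ hq
            intro q2 j hj hq2
            by_cases hbj : mask &&& (1 <<< j) ≠ 0
            · rw [if_pos hbj, if_pos hbj]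
              exact ⟨rfl, hq2⟩
            · rw [if_neg hbj, if_neg hbj]
              have hj' : i + 1 ≤ j ∧ j < i + 1 + (nums.length - (i+1)) :=
                List.mem_range'_1.mp hj
              have hjn : j < nums.length := by omega
              have hti : ¬ mask.testBit i := by rw [← bitA]; exact hbi
              have e1 : mask ||| 1 <<< i ||| 1 <<< j = mask ||| 2 ^ i ||| 2 ^ j := by
                rw [Nat.one_shiftLeft, Nat.one_shiftLeft]
              have hlt : mask < mask ||| 2 ^ i ||| 2 ^ j :=
                Nat.lt_of_lt_of_le (lt_or_two_pow mask i hti) Nat.left_le_or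
              have hlt2 : mask ||| 2 ^ i ||| 2 ^ j < 2 ^ nums.length :=
                Nat.or_lt_two_pow (Nat.or_lt_two_pow (by omega)
                  (Nat.pow_lt_pow_right (by norm_num) hi'))
                  (Nat.pow_lt_pow_right (by norm_num) hjn)
              have hrec := ih (mask ||| 1 <<< i ||| 1 <<< j) (op + 1) q2.2
                (by rw [e1]; omega) (by rw [e1]; omega) hq2
              exact ⟨by rw [hrec.1], hrec.2⟩
        have hfold := foldl_pair_inv (MemoInv nums) (mStep nums (f+1) mask op)
          (aStep nums (f+1) mask op) (List.range nums.length) (0, memo) hpoint hInv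
        refine ⟨hfold.1, ?_⟩
        intro mask' op' v hv
        rw [PySem.Dict.get?_insert] at hv
        by_cases hk : (mask', op') = (mask, op)
        · rw [if_pos hk] at hv
          injection hk with hm ho
          subst hm; subst ho
          refine ⟨hle, ?_⟩
          have hval : v = List.foldl (aStep nums (f+1) mask' op') 0 (List.range nums.length) := by
            rw [← hfold.1]
            exact (Option.some.inj hv).symm
          have hv2 : v = dpA nums ((f+1)+1) mask' op' := by
            rw [dpA_succ, if_neg hfull]
            exact hval
          rw [hv2, show (2 : Nat) ^ nums.length = (2 ^ nums.length - 1) + 1 from by omega]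
          exact dpA_stable nums (f+1) (2 ^ nums.length - 1) mask' op' hle (by omega) (by omega)
        · rw [if_neg hk] at hv
          exact hfold.2 mask' op' v hv

-- value B must hold at table index k (0 at the unreachable odd-popcount masks)
def Bval (nums : List Int) (k : Nat) : Int :=
  if pvBitCount k % 2 = 1 then 0
  else dpA nums (2 ^ nums.length) k (((pvBitCount k / 2 : Nat) : Int) + 1)

lemma table_get (nums : List Int) (i j : Nat) (hi : i < nums.length) (hj : j < nums.length) :
    ((bGcdTable nums).getD i []).getD j 0 = pvGcd (nums.getD i 0) (nums.getD j 0) := by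
  unfold bGcdTable
  simp [List.getD_eq_getElem?_getD, List.getElem?_map, List.getElem?_range, hi, hj]

lemma best_eq (nums : List Int) (m : Nat) (dp : List Int)
    (hm : m < 2 ^ nums.length - 1)
    (hdp : ∀ k, m < k → k ≤ 2 ^ nums.length - 1 → dp.getD k 0 = Bval nums k)
    (hev : pvBitCount m % 2 = 0) :
    bStep nums (bGcdTable nums) dp m = dp.set m (Bval nums m) := by
  have hp1 : (0 : Nat) < 2 ^ nums.length := Nat.two_pow_pos _
  have hn1 : 1 ≤ nums.length := by
    by_contra hc
    have h0 : nums.length = 0 := by omega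
    rw [h0] at hm
    simp at hm
  have hpow2 : 2 ≤ 2 ^ nums.length := by
    calc (2 : Nat) = 2 ^ 1 := rfl
      _ ≤ 2 ^ nums.length := Nat.pow_le_pow_right (by norm_num) hn1
  simp only [bStep]
  rw [if_neg (show ¬ (pvBitCount m &&& 1 ≠ 0) by rw [Nat.and_one_is_mod]; omega)]
  congr 1
  rw [Bval, if_neg (show ¬ pvBitCount m % 2 = 1 by omega)]
  rw [show (2 : Nat) ^ nums.length = (2 ^ nums.length - 1) + 1 from by omega]
  simp only [dpA]
  rw [if_neg (show ¬ m = 2 ^ nums.length - 1 by omega)]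
  apply PySem.List.foldl_congr_mem
  intro acc i hi
  have hi' : i < nums.length := List.mem_range.mp hi
  by_cases ht : m.testBit i
  · rw [if_pos ((bitB m i).mpr ht), if_pos ((bitA m i).mpr ht)]
  · rw [if_neg (fun hcc => ht ((bitB m i).mp hcc)), if_neg (fun hcc => ht ((bitA m i).mp hcc))]
    apply PySem.List.foldl_congr_mem
    intro acc2 j hj
    have hj' : i + 1 ≤ j ∧ j < i + 1 + (nums.length - (i+1)) := List.mem_range'_1.mp hj
    have hjn : j < nums.length := by omega
    by_cases htj : m.testBit j
    · rw [if_pos ((bitB m j).mpr htj), if_pos ((bitA m j).mpr htj)]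
    · rw [if_neg (fun hcc => htj ((bitB m j).mp hcc)), if_neg (fun hcc => htj ((bitA m j).mp hcc))]
      rw [max_if]
      congr 1
      rw [table_get nums i j hi' hjn]
      congr 1
      have e1 : m ||| 1 <<< i ||| 1 <<< j = m ||| 2 ^ i ||| 2 ^ j := by
        rw [Nat.one_shiftLeft, Nat.one_shiftLeft]
      rw [e1]
      have htj2 : ¬ (m ||| 2 ^ i).testBit j = true := by
        simp [Nat.testBit_or, Nat.testBit_two_pow, htj]
        omega
      have hpcnew : pvBitCount (m ||| 2 ^ i ||| 2 ^ j) = pvBitCount m + 2 := by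
        rw [pc_or_pow j _ htj2, pc_or_pow i _ ht]
      have hlt : m < m ||| 2 ^ i ||| 2 ^ j :=
        Nat.lt_of_lt_of_le (lt_or_two_pow m i ht) Nat.left_le_or
      have hlt2 : m ||| 2 ^ i ||| 2 ^ j < 2 ^ nums.length :=
        Nat.or_lt_two_pow (Nat.or_lt_two_pow (by omega)
          (Nat.pow_lt_pow_right (by norm_num) hi')) (Nat.pow_lt_pow_right (by norm_num) hjn)
      rw [hdp _ hlt (by omega), Bval, if_neg (show ¬ pvBitCount (m ||| 2 ^ i ||| 2 ^ j) % 2 = 1 by omega)]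
      have hop : ((pvBitCount (m ||| 2 ^ i ||| 2 ^ j) / 2 : Nat) : Int) + 1 =
          ((pvBitCount m / 2 : Nat) : Int) + 1 + 1 := by
        rw [hpcnew]
        push_cast [Nat.add_div_right]
        omega
      rw [hop]
      rw [show (2 : Nat) ^ nums.length = (2 ^ nums.length - 1) + 1 from by omega,
          show (2 : Nat) ^ nums.length - 1 = (2 ^ nums.length - 2) + 1 from by omega]
      exact dpA_stable nums _ _ _ _ (by omega) (by omega) (by omega)

lemma bStep_length (nums : List Int) (g : List (List Int)) (dp : List Int) (m : Nat) :
    (bStep nums g dp m).length = dp.length := by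
  simp only [bStep]
  split
  · rfl
  · simp

lemma bStep_getD_ne (nums : List Int) (g : List (List Int)) (dp : List Int) (m k : Nat)
    (h : k ≠ m) : (bStep nums g dp m).getD k 0 = dp.getD k 0 := by
  simp only [bStep]
  split
  · rfl
  · rw [List.getD_eq_getElem?_getD, List.getElem?_set_ne (by omega), ← List.getD_eq_getElem?_getD]

lemma loop_inv (nums : List Int) : ∀ (m : Nat) (dp : List Int),
    dp.length = 2 ^ nums.length → m ≤ 2 ^ nums.length - 1 →
    (∀ k, m ≤ k → k ≤ 2 ^ nums.length - 1 → dp.getD k 0 = Bval nums k) →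
    (∀ k, k < m → dp.getD k 0 = 0) →
    ∀ k, k ≤ 2 ^ nums.length - 1 →
      (List.foldl (bStep nums (bGcdTable nums)) dp (List.range m).reverse).getD k 0 = Bval nums k := by
  intro m
  induction m with
  | zero =>
    intro dp h1 h2 h3 h4 k hk
    simpa using h3 k (Nat.zero_le k) hk
  | succ m ih =>
    intro dp h1 h2 h3 h4 k hk
    rw [List.range_succ, List.reverse_append, List.reverse_singleton, List.singleton_append,
      List.foldl_cons]
    refine ih (bStep nums (bGcdTable nums) dp m) ?_ (by omega) ?_ ?_ k hk
    · rw [bStep_length]; exact h1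
    · intro k' hk1 hk2
      rcases Nat.eq_or_lt_of_le hk1 with he | hlt
      · subst he
        by_cases hpar : pvBitCount m % 2 = 1
        · have hskip : bStep nums (bGcdTable nums) dp m = dp := by
            simp only [bStep]
            rw [if_pos (show pvBitCount m &&& 1 ≠ 0 by rw [Nat.and_one_is_mod]; omega)]
          rw [hskip, h4 m (Nat.lt_succ_self m), Bval, if_pos hpar]
        · have hbest := best_eq nums m dp (by omega)
            (fun k2 hk3 hk4 => h3 k2 (by omega) hk4) (by omega)
          have hmlen : m < dp.length := by
            have : (0 : Nat) < 2 ^ nums.length := Nat.two_pow_pos _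
            omega
          rw [hbest, List.getD_eq_getElem?_getD,
            List.getElem?_set_self (by simpa using hmlen)]
          rfl
      · rw [bStep_getD_ne _ _ _ _ _ (by omega)]
        exact h3 k' (by omega) hk2
    · intro k' hk'
      rw [bStep_getD_ne _ _ _ _ _ (by omega)]
      exact h4 k' (by omega)

-- ===== VERDICT (by name: the statement is the Claim_ definition above) =====
lemma Bval_full (nums : List Int) : Bval nums (2 ^ nums.length - 1) = 0 := by
  rw [Bval]
  split_ifs with h
  · rfl
  · rw [show (2 : Nat) ^ nums.length = (2 ^ nums.length - 1) + 1 from by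
      have := Nat.two_pow_pos nums.length; omega]
    simp only [dpA]
    rw [if_pos (by omega)]

theorem maxScore_spec : Claim_equal_maxScore := by
  intro nums _
  unfold Spec_maxScore maxScore maxScore_alt
  have hp1 : (0 : Nat) < 2 ^ nums.length := Nat.two_pow_pos _
  have hfin := loop_inv nums (2 ^ nums.length - 1)
    (List.replicate (2 ^ nums.length - 1 + 1) 0)
    (by simp; omega) (le_refl _)
    (fun k hk1 hk2 => by
      have hkf : k = 2 ^ nums.length - 1 := by omega
      subst hkf
      rw [List.getD_replicate _ (by omega), Bval_full])
    (fun k hk => by rw [List.getD_replicate _ (by omega)])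
    0 (Nat.zero_le _)
  simp only []
  rw [hfin]
  simp only [Bval, pvBitCount]
  norm_num
  rw [show (2 : Nat) ^ nums.length = (2 ^ nums.length - 1) + 1 from by omega]
  exact (dpMemo_correct nums (2 ^ nums.length - 1) 0 1 PySem.Dict.empty (by omega) (by omega)
    (fun mask op v hv => by simp [PySem.Dict.get?_empty] at hv)).1
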